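-- pv_equiv track=rewrite | github.com/You-TZ/Py-test | L-Python/python-3-slice.py | trt
-- ===== SOURCE A (Python) =====
-- def  trt(v):
--      start = 0
--      end  = 1
--      if len(v) != 0:
--         while start <= len(v)-1:
--             if v[start] == "":
--                  start = start + 1
--             else:
--                 break
--         if start == len(v):
--             v = ""
--         else:
--             while end <= len(v):
--                 if v[-end] == "":
--                     end = end + 1
--                 else:
--                     break
--             v = v[start:len(v)-end+1]
--      return v
-- ===== SOURCE B (Python) =====
-- def trt(v):
--     first = None
--     last = None
--     for i, x in enumerate(v):
--         if x != "":
--             if first is None: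
--                 first = i
--             last = i
--     if first is None:
--         return []
--     return v[first:last + 1]
-- ===== Notes on version B (the rewrite author's own statement) =====
-- stated objective: simpler
-- what changed: Replaced A's two separate index-walking while-loops (forward from 0, backward via negative indexing) with a single forward enumerate pass that records the first and last non-empty indices, then one slice.
-- outside the precondition, e.g. on trt(['']): A returns '', B returns []
import Mathlib
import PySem

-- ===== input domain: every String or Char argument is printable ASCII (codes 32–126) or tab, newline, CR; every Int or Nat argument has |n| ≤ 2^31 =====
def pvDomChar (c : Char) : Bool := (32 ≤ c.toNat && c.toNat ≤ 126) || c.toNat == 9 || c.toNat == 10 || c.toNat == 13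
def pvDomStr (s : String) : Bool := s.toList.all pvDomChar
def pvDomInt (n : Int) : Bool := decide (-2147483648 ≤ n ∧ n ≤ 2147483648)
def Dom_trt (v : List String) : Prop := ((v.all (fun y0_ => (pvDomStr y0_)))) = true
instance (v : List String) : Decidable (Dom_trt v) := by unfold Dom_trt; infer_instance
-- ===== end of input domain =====

-- B replaces A's two index-walking while-loops (forward from 0, backward via negative
-- indexing) by a single forward enumerate pass recording the first and last non-empty
-- indices, then one slice (objective: simpler).

-- ===== PORT A =====
-- while start <= len(v)-1: if v[start] == "": start += 1 else break
def trtStartLoop (v : List String) (start : Nat) : Nat :=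
  if h : start < v.length then
    if v[start] == "" then trtStartLoop v (start + 1) else start
  else start
termination_by v.length - start

-- while end <= len(v): if v[-end] == "": end += 1 else break
-- v[-end] is PySem.List.pyGetD v (-end) ""; the default is never read: inside the
-- guard 1 ≤ end ≤ len(v) the negative index is always in range, as in Python.
def trtEndLoop (v : List String) (e : Nat) : Nat :=
  if h : e ≤ v.length then
    if PySem.List.pyGetD v (-(e : Int)) "" == "" then trtEndLoop v (e + 1) else e
  else e
termination_by v.length + 1 - e

def trt (v : List String) : List String :=
  if v.length ≠ 0 then
    let start := trtStartLoop v 0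
    if start = v.length then
      -- Python assigns v = "" (a str, not a list): outside Pre_trt; [] is a placeholder
      []
    else
      let e := trtEndLoop v 1
      PySem.List.slice v (some (start : Int)) (some ((v.length : Int) - e + 1))
  else v

-- ===== PORT B =====
def trt_alt (v : List String) : List String :=
  let p := (PySem.List.enumerate v 0).foldl
    (fun (p : Option Int × Option Int) ix =>
      if ix.2 != "" then (if p.1 = none then some ix.1 else p.1, some ix.1) else p)
    (none, none)
  match p with
  | (some f, some l) => PySem.List.slice v (some f) (some (l + 1))
  | _ => v.take 0  -- 'return []'; reached only when no element is non-empty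

-- ===== PRECONDITION & SPEC =====
-- Pre_ excludes non-empty lists whose elements are all "", on which A returns the
-- string "" — not a value of the declared List String type (B returns [] there).
def Pre_trt (v : List String) : Prop := v = [] ∨ ∃ s ∈ v, s ≠ ""
instance (v : List String) : Decidable (Pre_trt v) := by unfold Pre_trt; infer_instance
def pvWitness_trt : List String := ["", "a", ""]
def Spec_trt (v : List String) (out : List String) : Prop := out = trt_alt v
instance (v : List String) (out : List String) : Decidable (Spec_trt v out) := by unfold Spec_trt; infer_instance

-- ===== CLAIM (what is proved, stated in full; the proofs are below) =====
def Claim_equal_trt : Prop := ∀ (v : List String), Dom_trt v → Pre_trt v → Spec_trt v (trt v)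

-- ===== LEMMAS AND PROOFS =====

-- index of the last element ≠ "" (proof-side characterisation used for B's foldl)
def lastHit (xs : List String) : Option Nat :=
  match xs with
  | [] => none
  | x :: t =>
    match lastHit t with
    | some j => some (j + 1)
    | none => if x != "" then some 0 else none

-- B's foldl step, named so the lemmas can speak about it
def bstep (p : Option Int × Option Int) (ix : Int × String) : Option Int × Option Int :=
  if ix.2 != "" then (if p.1 = none then some ix.1 else p.1, some ix.1) else p

lemma trtStartLoop_eq (v : List String) :
    ∀ n k, v.length - k ≤ n →
      trtStartLoop v k = k + ((v.drop k).findIdx (fun s => s != "")) := by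
  intro n
  induction n with
  | zero =>
    intro k hk
    rw [trtStartLoop]
    simp only [dif_neg (by omega : ¬ k < v.length)]
    rw [List.drop_eq_nil_of_le (by omega)]
    simp [List.findIdx_nil]
  | succ n ih =>
    intro k hk
    rw [trtStartLoop]
    by_cases h : k < v.length
    · simp only [dif_pos h]
      rw [List.drop_eq_getElem_cons h, List.findIdx_cons]
      by_cases he : v[k] == ""
      · have : (v[k] != "") = false := by simp_all
        rw [if_pos he, this, ih (k+1) (by omega)]
        simp only [cond_false]; omega
      · have : (v[k] != "") = true := by simp_all
        rw [if_neg he, this]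
        simp
    · simp only [dif_neg h]
      rw [List.drop_eq_nil_of_le (by omega)]
      simp [List.findIdx_nil]

lemma trtEndLoop_eq (v : List String) :
    ∀ n e, 1 ≤ e → v.length + 1 - e ≤ n →
      trtEndLoop v e = e + ((v.reverse.drop (e - 1)).findIdx (fun s => s != "")) := by
  intro n
  induction n with
  | zero =>
    intro e h1 hn
    rw [trtEndLoop]
    simp only [dif_neg (by omega : ¬ e ≤ v.length)]
    rw [List.drop_eq_nil_of_le (by simp; omega)]
    simp [List.findIdx_nil]
  | succ n ih =>
    intro e h1 hn
    rw [trtEndLoop]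
    by_cases h : e ≤ v.length
    · simp only [dif_pos h]
      have hget : PySem.List.pyGetD v (-(e : Int)) "" = v[v.length - e] :=
        PySem.List.pyGetD_neg_natCast v e "" (by omega) h
      have hrevlen : e - 1 < v.reverse.length := by simp; omega
      have hrev : v.reverse[e-1] = v[v.length - e] := by
        simp [List.getElem_reverse]; congr 1; omega
      rw [List.drop_eq_getElem_cons hrevlen, List.findIdx_cons, hrev, hget]
      by_cases he : v[v.length - e] == ""
      · have : (v[v.length - e] != "") = false := by simp_all
        rw [if_pos he, this, ih (e+1) (by omega) (by omega)]
        simp only [cond_false]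
        have : e + 1 - 1 = e - 1 + 1 := by omega
        rw [this]; omega
      · have : (v[v.length - e] != "") = true := by simp_all
        rw [if_neg he, this]
        simp
    · simp only [dif_neg h]
      rw [List.drop_eq_nil_of_le (by simp; omega)]
      simp [List.findIdx_nil]

lemma bfold_fst_some (xs : List String) :
    ∀ (s : Int) (a : Int) (acc2 : Option Int),
      ((PySem.List.enumerate xs s).foldl bstep (some a, acc2)).1 = some a := by
  induction xs with
  | nil => intro s a acc2; simp [PySem.List.enumerate_nil]
  | cons x t ih =>
    intro s a acc2
    rw [PySem.List.enumerate_cons]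
    simp only [List.foldl_cons]
    by_cases hx : x != ""
    · rw [show bstep (some a, acc2) (s, x) = (some a, some s) by simp [bstep, hx]]
      exact ih (s+1) a (some s)
    · rw [show bstep (some a, acc2) (s, x) = (some a, acc2) by simp [bstep]; simp_all]
      exact ih (s+1) a acc2

lemma bfold_fst (xs : List String) :
    ∀ (s : Int) (acc2 : Option Int),
      ((PySem.List.enumerate xs s).foldl bstep (none, acc2)).1 =
        if xs.any (fun y => y != "") then some (s + (xs.findIdx (fun y => y != "") : Int)) else none := by
  induction xs with
  | nil => intro s acc2; simp [PySem.List.enumerate_nil]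
  | cons x t ih =>
    intro s acc2
    rw [PySem.List.enumerate_cons]
    simp only [List.foldl_cons]
    by_cases hx : x != ""
    · rw [show bstep (none, acc2) (s, x) = (some s, some s) by simp [bstep, hx]]
      rw [bfold_fst_some t (s+1) s (some s)]
      simp [List.any_cons, hx, List.findIdx_cons]
    · have hx' : (x != "") = false := by simp_all
      rw [show bstep (none, acc2) (s, x) = (none, acc2) by simp [bstep, hx']]
      rw [ih (s+1) acc2]
      simp only [List.any_cons, Bool.false_or, List.findIdx_cons, hx', cond_false]
      by_cases ha : t.any (fun y => y != "")
      · rw [if_pos ha, if_pos ha]; congr 1; push_cast; ring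
      · rw [if_neg ha, if_neg ha]

lemma bfold_snd (xs : List String) :
    ∀ (s : Int) (acc : Option Int × Option Int),
      ((PySem.List.enumerate xs s).foldl bstep acc).2 =
        match lastHit xs with
        | some j => some (s + (j : Int))
        | none => acc.2 := by
  induction xs with
  | nil => intro s acc; simp [PySem.List.enumerate_nil, lastHit]
  | cons x t ih =>
    intro s acc
    rw [PySem.List.enumerate_cons]
    simp only [List.foldl_cons]
    rw [ih (s+1) (bstep acc (s, x))]
    by_cases hx : x != ""
    · simp only [lastHit]
      cases hlh : lastHit t with
      | some j => simp only; congr 1; push_cast; ring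
      | none => simp [bstep, hx]
    · have hx' : (x != "") = false := by simp_all
      simp only [lastHit, hx']
      cases hlh : lastHit t with
      | some j => simp only; congr 1; push_cast; ring
      | none => simp [bstep, hx']

lemma lastHit_append (xs : List String) (x : String) :
    lastHit (xs ++ [x]) = if x != "" then some xs.length else lastHit xs := by
  induction xs with
  | nil => simp [lastHit]
  | cons y t ih =>
    simp only [List.cons_append, lastHit, ih]
    by_cases hx : x != ""
    · simp only [hx, if_pos rfl]; simp
    · have hx' : (x != "") = false := by simp_all
      simp [hx']

lemma lastHit_eq (xs : List String) (h : xs.any (fun y => y != "")) :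
    lastHit xs = some (xs.length - 1 - xs.reverse.findIdx (fun y => y != "")) := by
  induction xs using List.reverseRecOn with
  | nil => simp at h
  | append_singleton t x ih =>
    rw [lastHit_append]
    by_cases hx : x != ""
    · rw [if_pos hx]
      simp only [List.reverse_append, List.reverse_singleton, List.singleton_append,
        List.findIdx_cons, hx, cond_true, List.length_append, List.length_singleton]
      norm_num
    · have hx' : (x != "") = false := by simp_all
      have ht : t.any (fun y => y != "") := by
        simp only [List.any_append, List.any_cons, List.any_nil, hx'] at h
        simpa using h
      have hfi : t.reverse.findIdx (fun y => y != "") < t.reverse.length :=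
        List.findIdx_lt_length_of_exists (by simpa using ht)
      rw [hx', if_neg (by simp), ih ht]
      simp only [List.reverse_append, List.reverse_singleton, List.singleton_append,
        List.findIdx_cons, hx', cond_false, List.length_append, List.length_singleton]
      simp only [List.length_reverse] at hfi
      congr 1; omega

lemma trt_eq_alt (v : List String) (hpre : v = [] ∨ ∃ s ∈ v, s ≠ "") :
    trt v = trt_alt v := by
  rcases hpre with rfl | hex
  · simp [trt, trt_alt, PySem.List.enumerate_nil]
  · obtain ⟨s, hs, hne⟩ := hex
    have hany : v.any (fun y => y != "") = true :=
      List.any_eq_true.mpr ⟨s, hs, by simp [hne]⟩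
    have hlen : 0 < v.length := List.length_pos_of_mem hs
    have hi0lt : v.findIdx (fun y => y != "") < v.length :=
      List.findIdx_lt_length_of_exists ⟨s, hs, by simp [hne]⟩
    set i0 := v.findIdx (fun y => y != "") with hi0
    have hrflt : v.reverse.findIdx (fun y => y != "") < v.length := by
      have := List.findIdx_lt_length_of_exists (p := fun y => y != "") (xs := v.reverse)
        ⟨s, by simp [hs], by simp [hne]⟩
      simpa using this
    set rf := v.reverse.findIdx (fun y => y != "") with hrf
    have hstart : trtStartLoop v 0 = i0 := by
      have := trtStartLoop_eq v v.length 0 (by omega)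
      simpa using this
    have hend : trtEndLoop v 1 = 1 + rf := by
      have := trtEndLoop_eq v (v.length + 1) 1 (le_refl _) (by omega)
      simpa using this
    have hA : trt v = PySem.List.slice v (some (i0 : Int)) (some (((v.length - rf : Nat)) : Int)) := by
      rw [trt]
      rw [if_pos (by omega)]
      simp only [hstart, hend]
      rw [if_neg (by omega)]
      congr 1
      push_cast [Nat.cast_sub (by omega : rf ≤ v.length)]
      ring
    have hb : (fun (p : Option Int × Option Int) (ix : Int × String) =>
        if ix.2 != "" then (if p.1 = none then some ix.1 else p.1, some ix.1) else p) = bstep := rfl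
    have hp1 : ((PySem.List.enumerate v 0).foldl bstep (none, none)).1 = some (i0 : Int) := by
      rw [bfold_fst]; simp [hany, hi0]
    have hp2 : ((PySem.List.enumerate v 0).foldl bstep (none, none)).2 =
        some ((v.length - 1 - rf : Nat) : Int) := by
      rw [bfold_snd, lastHit_eq v hany]; simp [hrf]
    have hpair : (PySem.List.enumerate v 0).foldl bstep (none, none) =
        (some (i0 : Int), some ((v.length - 1 - rf : Nat) : Int)) := Prod.ext hp1 hp2
    have hB : trt_alt v = PySem.List.slice v (some (i0 : Int)) (some (((v.length - rf : Nat)) : Int)) := by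
      rw [trt_alt, hb, hpair]
      simp only []
      congr 1
      push_cast [Nat.cast_sub (by omega : rf ≤ v.length - 1), Nat.cast_sub (by omega : 1 ≤ v.length),
        Nat.cast_sub (by omega : rf ≤ v.length)]
      ring
    rw [hA, hB]

-- ===== VERDICT (by name: the statement is the Claim_ definition above) =====
theorem trt_spec : Claim_equal_trt := by
  intro v _ hpre
  unfold Spec_trt
  unfold Pre_trt at hpre
  exact trt_eq_alt v hpre
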